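-- pv_equiv track=rewrite | github.com/jadamsuryateja/Feedback_processor_ver | app.py | create_header_dict
-- ===== SOURCE A (Python) =====
-- from collections import defaultdict
--
-- def create_header_dict(headers):
--     """Create dictionary with header count and usage tracking"""
--     header_count = defaultdict(int)
--     for header in headers:
--         header_count[header] += 1
--
--     header_info = {}
--     for header, count in header_count.items():
--         header_info[header] = {
--             'count': count,
--             'used': 0
--         }
--     return header_info
-- ===== SOURCE B (Python) =====
-- def create_header_dict(headers):
--     """Create dictionary with header count and usage tracking"""
--     header_info = {}
--     for header in headers:
--         if header in header_info:
--             header_info[header]['count'] += 1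
--         else:
--             header_info[header] = {'count': 1, 'used': 0}
--     return header_info
-- ===== Notes on version B (the rewrite author's own statement) =====
-- stated objective: simpler
-- what changed: B builds the result dict in one pass over headers (increment count in place or insert a fresh entry), removing A's intermediate defaultdict counter and the second loop over its items.
import Mathlib
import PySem

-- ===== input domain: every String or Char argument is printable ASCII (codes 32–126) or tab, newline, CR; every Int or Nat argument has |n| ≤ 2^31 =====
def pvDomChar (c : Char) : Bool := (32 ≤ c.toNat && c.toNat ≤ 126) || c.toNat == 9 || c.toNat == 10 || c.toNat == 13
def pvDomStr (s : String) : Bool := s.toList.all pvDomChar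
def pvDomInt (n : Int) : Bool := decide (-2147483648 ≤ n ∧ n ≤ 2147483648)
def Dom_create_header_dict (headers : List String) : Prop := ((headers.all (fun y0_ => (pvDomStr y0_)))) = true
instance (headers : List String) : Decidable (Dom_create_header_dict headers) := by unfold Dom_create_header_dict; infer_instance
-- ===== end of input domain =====

-- B is a simpler single-pass rewrite: it builds the result dict directly, without A's
-- intermediate defaultdict counter and second loop; equivalence of the return value is proved.

-- ===== PORT A =====
def create_header_dict (headers : List String) : List (String × List (String × Int)) :=
  -- header_count = defaultdict(int); for header in headers: header_count[header] += 1
  let header_count : PySem.Dict String Int :=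
    headers.foldl (fun d h => d.modify h 0 (· + 1)) PySem.Dict.empty
  -- header_info = {}; for header, count in header_count.items(): header_info[header] = {'count': count, 'used': 0}
  let header_info : PySem.Dict String (List (String × Int)) :=
    header_count.items.foldl (fun d p => d.insert p.1 [("count", p.2), ("used", 0)]) PySem.Dict.empty
  header_info.items

-- ===== PORT B =====
-- loop body of Source B: increment the stored count in place, or insert a fresh entry
def create_header_dict_step (d : PySem.Dict String (List (String × Int))) (h : String) :
    PySem.Dict String (List (String × Int)) :=
  if d.contains h then
    -- header_info[header]['count'] += 1
    d.modify h [] (fun inner => ((PySem.Dict.mk inner).modify "count" 0 (· + 1)).items)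
  else
    -- header_info[header] = {'count': 1, 'used': 0}
    d.insert h [("count", 1), ("used", 0)]

def create_header_dict_alt (headers : List String) : List (String × List (String × Int)) :=
  (headers.foldl create_header_dict_step PySem.Dict.empty).items

-- ===== PRECONDITION & SPEC =====
def Spec_create_header_dict (headers : List String) (out : List (String × List (String × Int))) : Prop := out = create_header_dict_alt headers
instance (headers : List String) (out : List (String × List (String × Int))) : Decidable (Spec_create_header_dict headers out) := by unfold Spec_create_header_dict; infer_instance

-- ===== CLAIM (what is proved, stated in full; the proofs are below) =====
def Claim_equal_create_header_dict : Prop := ∀ (headers : List String), Dom_create_header_dict headers → Spec_create_header_dict headers (create_header_dict headers)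

-- ===== LEMMAS AND PROOFS =====

-- common closed form: one entry per distinct header in first-appearance order, with its count
def chdClosed (xs : List String) : List (String × List (String × Int)) :=
  (PySem.Set.ofList xs).map (fun k => (k, [("count", (xs.count k : Int)), ("used", 0)]))

lemma chd_A_eq (headers : List String) : create_header_dict headers = chdClosed headers := by
  unfold create_header_dict chdClosed
  rw [show headers.foldl (fun d h => d.modify h 0 (· + 1)) PySem.Dict.empty
        = PySem.Dict.counter headers from (PySem.Dict.counter_eq_foldl headers).symm]
  rw [PySem.Dict.items_foldl_insert_fresh (PySem.Dict.counter headers).items Prod.fst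
        (fun p => [("count", p.2), ("used", 0)]) PySem.Dict.empty
        (fun a _ => PySem.Dict.contains_empty a.1)
        (PySem.Dict.nodup_keys_counter headers)]
  simp [PySem.Dict.items_counter, List.map_map]
  simp [Function.comp_def, PySem.Dict.empty]

-- the in-place increment of the inner dict, computed
lemma chd_inner_step (c : Int) :
    ((PySem.Dict.mk [("count", c), ("used", (0:Int))]).modify "count" 0 (· + 1)).items
      = [("count", c + 1), ("used", 0)] := by
  simp [PySem.Dict.modify, PySem.Dict.insert, PySem.Dict.getD, PySem.Dict.get?, PySem.Dict.contains]

-- invariant of B's single pass: keys are the distinct headers in order, values are the counts so far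
lemma chd_B_inv (xs : List String) :
    (xs.foldl create_header_dict_step PySem.Dict.empty).keys = PySem.Set.ofList xs ∧
    ∀ k ∈ xs, (xs.foldl create_header_dict_step PySem.Dict.empty).getD k []
        = [("count", (xs.count k : Int)), ("used", 0)] := by
  induction xs using List.reverseRecOn with
  | nil => simp [PySem.Set.ofList_nil]
  | append_singleton xs x ih =>
    obtain ⟨hk, hg⟩ := ih
    rw [List.foldl_append, List.foldl_cons, List.foldl_nil]
    set d := xs.foldl create_header_dict_step PySem.Dict.empty with hd
    rw [PySem.Set.ofList_append_singleton]
    by_cases hx : x ∈ xs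
    · have hmem : x ∈ PySem.Set.ofList xs := (PySem.Set.mem_ofList xs x).mpr hx
      have hcont : d.contains x = true := by
        rw [PySem.Dict.contains_eq_decide_mem_keys, hk]; simpa using hmem
      have hstep : create_header_dict_step d x
          = d.modify x [] (fun inner => ((PySem.Dict.mk inner).modify "count" 0 (· + 1)).items) := by
        simp [create_header_dict_step, hcont]
      constructor
      · rw [hstep, PySem.Dict.keys_modify, PySem.Dict.keys_insert_of_contains d _ hcont, hk,
           PySem.Set.add_of_mem hmem]
      · intro k hkmem
        rw [hstep, PySem.Dict.getD_modify]
        by_cases hke : k = x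
        · subst hke
          rw [if_pos rfl, hg k hx, chd_inner_step]
          simp [List.count_append]
        · rw [if_neg hke]
          have hkxs : k ∈ xs := by
            rcases List.mem_append.mp hkmem with h | h
            · exact h
            · exact absurd (List.mem_singleton.mp h) hke
          rw [hg k hkxs]
          have hxk : x ≠ k := Ne.symm hke
          simp [List.count_append, hxk]
    · have hmem : x ∉ PySem.Set.ofList xs := fun h => hx ((PySem.Set.mem_ofList xs x).mp h)
      have hcont : d.contains x = false := by
        rw [PySem.Dict.contains_eq_decide_mem_keys, hk]; simpa using hmem
      have hstep : create_header_dict_step d x = d.insert x [("count", 1), ("used", 0)] := by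
        simp [create_header_dict_step, hcont]
      constructor
      · rw [hstep, PySem.Dict.keys_insert_of_not_contains d _ hcont, hk,
           PySem.Set.add_of_not_mem hmem]
      · intro k hkmem
        rw [hstep, PySem.Dict.getD_insert]
        by_cases hke : k = x
        · subst hke
          rw [if_pos rfl]
          have : xs.count k = 0 := List.count_eq_zero.mpr hx
          simp [List.count_append, this]
        · rw [if_neg hke]
          have hkxs : k ∈ xs := by
            rcases List.mem_append.mp hkmem with h | h
            · exact h
            · exact absurd (List.mem_singleton.mp h) hke
          rw [hg k hkxs]
          have hxk : x ≠ k := Ne.symm hke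
          simp [List.count_append, hxk]

lemma chd_B_eq (headers : List String) : create_header_dict_alt headers = chdClosed headers := by
  unfold create_header_dict_alt chdClosed
  obtain ⟨hk, hg⟩ := chd_B_inv headers
  have hnd : (headers.foldl create_header_dict_step PySem.Dict.empty).keys.Nodup := by
    rw [hk]; exact PySem.Set.nodup_ofList headers
  rw [PySem.Dict.items_eq_map_keys _ hnd [], hk]
  exact List.map_congr_left fun k hkmem => by
    rw [hg k ((PySem.Set.mem_ofList headers k).mp hkmem)]


-- ===== VERDICT (by name: the statement is the Claim_ definition above) =====
theorem create_header_dict_spec : Claim_equal_create_header_dict := by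
  intro headers _
  unfold Spec_create_header_dict
  rw [chd_A_eq, chd_B_eq]
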